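-- pv_equiv track=rewrite | github.com/cgiuffr/hindex-by-year | hindex-by-year.py | computeHindex
-- ===== SOURCE A (Python) =====
-- def computeHindex(pub_cites_per_year, year):
--   cites_per_pub = []
--   for cites_per_year in pub_cites_per_year:
--     count = 0
--     for k,v in cites_per_year.items():
--       if k <= year:
--         count += v
--     cites_per_pub.append(count)
--
--   cites_per_pub.sort(reverse=True)
--   hindex = 0
--   pcount = 0
--   for c in cites_per_pub:
--     pcount += 1
--     if c >= pcount:
--       hindex += 1
--     else:
--       break
--
--   return hindex
--
-- pub_cites_per_year = []
-- ===== SOURCE B (Python) =====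
-- def computeHindex(pub_cites_per_year, year):
--   totals = [sum(v for k, v in d.items() if k <= year) for d in pub_cites_per_year]
--   n = len(totals)
--   hist = {}
--   for c in totals:
--     if c > 0:
--       key = min(c, n)
--       hist[key] = hist.get(key, 0) + 1
--   running = 0
--   for i in range(n, 0, -1):
--     running += hist.get(i, 0)
--     if running >= i:
--       return i
--   return 0
-- ===== Notes on version B (the rewrite author's own statement) =====
-- stated objective: alternative
-- what changed: Replaces sort-descending-and-scan-until-break with a clamped counting histogram (dict of citation totals capped at n) scanned from n downward for the first i with cumulative count >= i, removing the sort.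
import Mathlib
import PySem

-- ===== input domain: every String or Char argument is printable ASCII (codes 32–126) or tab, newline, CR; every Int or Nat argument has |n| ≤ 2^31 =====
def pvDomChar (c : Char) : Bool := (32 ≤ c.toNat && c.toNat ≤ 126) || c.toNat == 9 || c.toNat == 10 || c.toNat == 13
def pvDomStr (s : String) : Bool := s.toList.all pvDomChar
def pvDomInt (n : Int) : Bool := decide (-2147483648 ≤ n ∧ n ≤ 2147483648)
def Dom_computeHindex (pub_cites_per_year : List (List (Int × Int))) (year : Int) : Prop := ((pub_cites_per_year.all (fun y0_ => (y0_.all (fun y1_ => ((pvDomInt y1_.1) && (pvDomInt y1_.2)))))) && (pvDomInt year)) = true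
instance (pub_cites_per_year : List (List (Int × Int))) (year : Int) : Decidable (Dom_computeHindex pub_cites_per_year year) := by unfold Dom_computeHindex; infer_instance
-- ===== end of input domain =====

-- B replaces A's sort-descending-and-scan-until-break with a clamped counting histogram
-- (dict) scanned from n downward, avoiding the sort; objective: alternative algorithm
-- (measured cost is the same). Return values proved equal on all inputs.

-- ===== PORT A =====
-- A's second loop: pcount += 1; if c >= pcount: hindex += 1 else: break
def aLoop (s : List Int) (pcount hindex : Int) : Int :=
  match s with
  | [] => hindex
  | c :: rest => if pcount + 1 ≤ c then aLoop rest (pcount + 1) (hindex + 1) else hindex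

def computeHindex (pub_cites_per_year : List (List (Int × Int))) (year : Int) : Int :=
  let cites_per_pub := pub_cites_per_year.foldl (fun acc d =>
      acc ++ [d.foldl (fun count kv => if kv.1 ≤ year then count + kv.2 else count) 0]) []
  let s := PySem.List.sorted cites_per_pub (fun x => x) true
  aLoop s 0 0

-- ===== PORT B =====
def pubTotal (year : Int) (d : List (Int × Int)) : Int :=
  ((d.filter (fun kv => kv.1 ≤ year)).map Prod.snd).sum

-- B's final loop: for i in range(n, 0, -1): running += hist.get(i, 0); if running >= i: return i
def bGo (hist : PySem.Dict Int Int) : Nat → Int → Int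
  | 0, _ => 0
  | i + 1, running =>
      let r := running + hist.getD ((i : Int) + 1) 0
      if ((i : Int) + 1) ≤ r then ((i : Int) + 1) else bGo hist i r

def computeHindex_alt (pub_cites_per_year : List (List (Int × Int))) (year : Int) : Int :=
  let totals := pub_cites_per_year.map (pubTotal year)
  let n := totals.length
  let hist := totals.foldl (fun h c =>
      if 0 < c then h.insert (min c (n : Int)) (h.getD (min c (n : Int)) 0 + 1) else h)
    PySem.Dict.empty
  bGo hist n 0

-- ===== PRECONDITION & SPEC =====
def Spec_computeHindex (pub_cites_per_year : List (List (Int × Int))) (year : Int) (out : Int) : Prop := out = computeHindex_alt pub_cites_per_year year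
instance (pub_cites_per_year : List (List (Int × Int))) (year : Int) (out : Int) : Decidable (Spec_computeHindex pub_cites_per_year year out) := by unfold Spec_computeHindex; infer_instance

-- ===== CLAIM (what is proved, stated in full; the proofs are below) =====
def Claim_equal_computeHindex : Prop := ∀ (pub_cites_per_year : List (List (Int × Int))) (year : Int), Dom_computeHindex pub_cites_per_year year → Spec_computeHindex pub_cites_per_year year (computeHindex pub_cites_per_year year)

-- ===== LEMMAS AND PROOFS =====

-- the shared citation-total counts
theorem foldl_append_eq_map {α β : Type} (f : α → β) :
    ∀ (l : List α) (acc : List β), l.foldl (fun a x => a ++ [f x]) acc = acc ++ l.map f := by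
  intro l
  induction l with
  | nil => simp
  | cons x xs ih => intro acc; simp [List.foldl, ih]

theorem inner_total_eq (year : Int) (d : List (Int × Int)) :
    ∀ a : Int, d.foldl (fun count kv => if kv.1 ≤ year then count + kv.2 else count) a
      = a + pubTotal year d := by
  induction d with
  | nil => intro a; simp [pubTotal]
  | cons kv rest ih =>
      intro a
      simp only [List.foldl, pubTotal, List.filter]
      by_cases h : kv.1 ≤ year
      · simp [h, ih, pubTotal]; ring
      · simp [h, ih, pubTotal]

-- the A loop counts how far it walks
def gk : List Int → Int → Nat
  | [], _ => 0
  | c :: rest, p => if p + 1 ≤ c then gk rest (p + 1) + 1 else 0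

theorem aLoop_eq_gk : ∀ (t : List Int) (p h : Int), aLoop t p h = h + (gk t p : Int) := by
  intro t
  induction t with
  | nil => intro p h; simp [aLoop, gk]
  | cons c rest ih =>
      intro p h
      simp only [aLoop, gk]
      by_cases hc : p + 1 ≤ c
      · simp [hc, ih]; ring
      · simp [hc]

theorem gk_le_length : ∀ (t : List Int) (p : Int), gk t p ≤ t.length := by
  intro t
  induction t with
  | nil => intro p; simp [gk]
  | cons c rest ih =>
      intro p
      simp only [gk, List.length_cons]
      by_cases hc : p + 1 ≤ c
      · simp [hc]; exact ih (p + 1)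
      · simp [hc]

theorem gk_count_ge : ∀ (t : List Int) (p : Int), t.Pairwise (fun a b => b ≤ a) →
    gk t p ≤ t.countP (fun c => decide (p + (gk t p : Int) ≤ c)) := by
  intro t
  induction t with
  | nil => intro p _; simp [gk]
  | cons c rest ih =>
      intro p hpw
      rcases List.pairwise_cons.mp hpw with ⟨hle, hpw'⟩
      by_cases hc : p + 1 ≤ c
      · have hgk : gk (c :: rest) p = gk rest (p + 1) + 1 := by simp [gk, hc]
        have ihr := ih (p + 1) hpw'
        have hth : p + ((gk rest (p + 1) : Int) + 1) = (p + 1) + (gk rest (p + 1) : Int) := by ring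
        have hcth : (p + 1) + (gk rest (p + 1) : Int) ≤ c := by
          rcases Nat.eq_zero_or_pos (gk rest (p + 1)) with h0 | hpos
          · simp only [h0] at *; simpa using hc
          · have hpos' : 0 < rest.countP (fun x => decide ((p + 1) + (gk rest (p + 1) : Int) ≤ x)) :=
              lt_of_lt_of_le hpos ihr
            rcases List.countP_pos_iff.mp hpos' with ⟨x, hx, hpx⟩
            exact le_trans (of_decide_eq_true hpx) (hle x hx)
        have heq : (c :: rest).countP (fun x => decide (p + ((gk rest (p + 1) : Int) + 1) ≤ x))
            = rest.countP (fun x => decide ((p + 1) + (gk rest (p + 1) : Int) ≤ x)) + 1 := by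
          rw [List.countP_cons]
          have h1 : (decide (p + ((gk rest (p + 1) : Int) + 1) ≤ c)) = true := by
            rw [hth]; exact decide_eq_true hcth
          have h2 : (fun x => decide (p + ((gk rest (p + 1) : Int) + 1) ≤ x))
              = (fun x => decide ((p + 1) + (gk rest (p + 1) : Int) ≤ x)) := by
            funext x; rw [hth]
          rw [h1, h2]; simp
        rw [hgk]
        push_cast
        rw [heq]
        omega
      · simp [gk, hc]

theorem gk_count_lt : ∀ (t : List Int) (p h : Int), t.Pairwise (fun a b => b ≤ a) →
    p + (gk t p : Int) < h → t.countP (fun c => decide (h ≤ c)) ≤ gk t p := by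
  intro t
  induction t with
  | nil => intro p h _ _; simp
  | cons c rest ih =>
      intro p h hpw hlt
      rcases List.pairwise_cons.mp hpw with ⟨hle, hpw'⟩
      by_cases hc : p + 1 ≤ c
      · have hgk : gk (c :: rest) p = gk rest (p + 1) + 1 := by simp [gk, hc]
        rw [hgk] at hlt
        have hlt' : (p + 1) + (gk rest (p + 1) : Int) < h := by push_cast at hlt ⊢; omega
        have hrest := ih (p + 1) h hpw' hlt'
        have hcons : (c :: rest).countP (fun x => decide (h ≤ x))
            ≤ rest.countP (fun x => decide (h ≤ x)) + 1 := by
          rw [List.countP_cons]; split <;> omega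
        omega
      · have hgk : gk (c :: rest) p = 0 := by simp [gk, hc]
        rw [hgk] at hlt
        have hz : (c :: rest).countP (fun x => decide (h ≤ x)) = 0 := by
          rw [List.countP_eq_zero]
          intro x hx
          have hxc : x ≤ c := by
            rcases List.mem_cons.mp hx with h1 | h1
            · simp [h1]
            · exact hle x h1
          simp only [decide_eq_true_eq]
          omega
        omega

-- characterisation of A's result as a findGreatest over counts
theorem gk_eq_findGreatest (s : List Int) (hpw : s.Pairwise (fun a b => b ≤ a)) :
    gk s 0 = Nat.findGreatest (fun h => h ≤ s.countP (fun c => decide ((h : Int) ≤ c))) s.length := by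
  symm
  rw [Nat.findGreatest_eq_iff]
  refine ⟨gk_le_length s 0, ?_, ?_⟩
  · intro _
    have := gk_count_ge s 0 hpw
    simpa using this
  · intro k hk _ hP
    have hlt : (0 : Int) + (gk s 0 : Int) < (k : Int) := by push_cast; omega
    have := gk_count_lt s 0 (k : Int) hpw hlt
    omega

-- B side: the histogram fold is an insert-count fold over the clamped positive totals
theorem hist_fold_eq (nI : Int) :
    ∀ (L : List Int) (h0 : PySem.Dict Int Int),
    L.foldl (fun h c => if 0 < c then h.insert (min c nI) (h.getD (min c nI) 0 + 1) else h) h0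
      = ((L.filter (fun c => decide (0 < c))).map (fun c => min c nI)).foldl
          (fun d x => d.insert x (d.getD x 0 + 1)) h0 := by
  intro L
  induction L with
  | nil => intro h0; simp
  | cons c rest ih =>
      intro h0
      by_cases hc : 0 < c
      · simp [List.foldl, hc, ih]
      · simp [List.foldl, hc, ih]

theorem count_map_filter (nI v : Int) (L : List Int) :
    ((L.filter (fun c => decide (0 < c))).map (fun c => min c nI)).count v
      = L.countP (fun c => (min c nI == v) && decide (0 < c)) := by
  rw [List.count_eq_countP, List.countP_map, List.countP_filter]
  rfl

theorem hist_getD (nI v : Int) (L : List Int) :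
    (L.foldl (fun h c => if 0 < c then h.insert (min c nI) (h.getD (min c nI) 0 + 1) else h)
        PySem.Dict.empty).getD v 0
      = (L.countP (fun c => (min c nI == v) && decide (0 < c)) : Int) := by
  rw [hist_fold_eq, PySem.Dict.getD_foldl_insert_add_one, PySem.Dict.getD_empty,
    count_map_filter]
  simp

-- clamped cumulative counts
def Mcnt (L : List Int) (nI : Int) (i : Nat) : Nat :=
  L.countP (fun c => decide ((i : Int) ≤ min c nI) && decide (0 < c))

theorem countP_split {α : Type} (p q : α → Bool) :
    ∀ (l : List α), l.countP p
      = l.countP (fun a => p a && q a) + l.countP (fun a => p a && !q a) := by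
  intro l
  induction l with
  | nil => simp
  | cons x xs ih =>
      rw [List.countP_cons, List.countP_cons, List.countP_cons]
      cases hp : p x <;> cases hq : q x <;> simp <;> omega

theorem Mcnt_succ (L : List Int) (nI : Int) (i : Nat) :
    Mcnt L nI (i + 1)
      = Mcnt L nI (i + 1 + 1) + L.countP (fun c => (min c nI == (i : Int) + 1) && decide (0 < c)) := by
  unfold Mcnt
  have c1 : ((i + 1 : Nat) : Int) = (i : Int) + 1 := by push_cast; ring
  have c2 : ((i + 1 + 1 : Nat) : Int) = (i : Int) + 2 := by push_cast; ring
  simp only [c1, c2]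
  rw [countP_split (fun c => decide ((i : Int) + 1 ≤ min c nI) && decide (0 < c))
    (fun c => decide ((i : Int) + 2 ≤ min c nI)) L]
  congr 1
  · apply List.countP_congr
    intro c _
    cases h1 : decide ((i : Int) + 1 ≤ min c nI) <;>
      cases h2 : decide ((i : Int) + 2 ≤ min c nI) <;>
      cases h3 : decide (0 < c) <;>
      simp_all <;> omega
  · apply List.countP_congr
    intro c _
    cases h1 : decide ((i : Int) + 1 ≤ min c nI) <;>
      cases h2 : decide ((i : Int) + 2 ≤ min c nI) <;>
      cases h3 : (min c nI == (i : Int) + 1) <;>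
      cases h4 : decide (0 < c) <;>
      simp_all <;> omega

theorem Mcnt_top (L : List Int) : Mcnt L (L.length : Int) (L.length + 1) = 0 := by
  unfold Mcnt
  rw [List.countP_eq_zero]
  intro c _
  have h : ¬ (((L.length : Nat) + 1 : Int) ≤ min c (L.length : Int)) := by
    have := min_le_right c (L.length : Int)
    push_cast
    omega
  simp [h]

theorem Mcnt_eq_count (L : List Int) (i : Nat) (h1 : 1 ≤ i) (h2 : i ≤ L.length) :
    Mcnt L (L.length : Int) i = L.countP (fun c => decide ((i : Int) ≤ c)) := by
  unfold Mcnt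
  apply List.countP_congr
  intro c _
  cases hm : decide ((i : Int) ≤ min c (L.length : Int)) <;>
    cases hc : decide (0 < c) <;> cases hg : decide ((i : Int) ≤ c) <;>
    simp_all <;>
    omega

theorem bGo_eq (L : List Int) :
    ∀ (i : Nat), i ≤ L.length →
    bGo (L.foldl (fun h c => if 0 < c then
          h.insert (min c (L.length : Int)) (h.getD (min c (L.length : Int)) 0 + 1) else h)
        PySem.Dict.empty) i (Mcnt L (L.length : Int) (i + 1) : Int)
      = (Nat.findGreatest (fun h => h ≤ L.countP (fun c => decide ((h : Int) ≤ c))) i : Int) := by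
  intro i
  induction i with
  | zero => intro _; simp [bGo]
  | succ i ih =>
      intro hle
      rw [bGo]
      have hr : (Mcnt L (L.length : Int) (i + 1 + 1) : Int)
          + (L.foldl (fun h c => if 0 < c then
              h.insert (min c (L.length : Int)) (h.getD (min c (L.length : Int)) 0 + 1) else h)
            PySem.Dict.empty).getD ((i : Int) + 1) 0
          = (Mcnt L (L.length : Int) (i + 1) : Int) := by
        rw [hist_getD, Mcnt_succ L ((L.length : Nat) : Int) i]
        push_cast
        ring
      have hM : Mcnt L (L.length : Int) (i + 1)
          = L.countP (fun c => decide (((i + 1 : Nat) : Int) ≤ c)) :=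
        Mcnt_eq_count L (i + 1) (by omega) hle
      simp only [Nat.cast_add, Nat.cast_one] at hM
      rw [Nat.findGreatest_succ]
      simp only [Nat.cast_add, Nat.cast_one]
      by_cases hP : (i + 1) ≤ L.countP (fun c => decide ((i : Int) + 1 ≤ c))
      · have hc : ((i : Int) + 1) ≤ (Mcnt L (L.length : Int) (i + 1 + 1) : Int)
            + (L.foldl (fun h c => if 0 < c then
                h.insert (min c (L.length : Int)) (h.getD (min c (L.length : Int)) 0 + 1) else h)
              PySem.Dict.empty).getD ((i : Int) + 1) 0 := by
          rw [hr, hM]; push_cast; omega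
        rw [if_pos hc, if_pos hP]
        push_cast
        ring
      · have hc : ¬ (((i : Int) + 1) ≤ (Mcnt L (L.length : Int) (i + 1 + 1) : Int)
            + (L.foldl (fun h c => if 0 < c then
                h.insert (min c (L.length : Int)) (h.getD (min c (L.length : Int)) 0 + 1) else h)
              PySem.Dict.empty).getD ((i : Int) + 1) 0) := by
          rw [hr, hM]
          intro hcon
          apply hP
          omega
        rw [if_neg hc, if_neg hP, hr]
        exact ih (by omega)

-- ===== VERDICT (by name: the statement is the Claim_ definition above) =====
theorem computeHindex_spec : Claim_equal_computeHindex := by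
  intro pubs year _
  unfold Spec_computeHindex computeHindex computeHindex_alt
  simp only []
  set L := pubs.map (pubTotal year) with hL
  have htotals : pubs.foldl (fun acc d =>
      acc ++ [d.foldl (fun count kv => if kv.1 ≤ year then count + kv.2 else count) 0]) [] = L := by
    have h1 := foldl_append_eq_map
      (f := fun d : List (Int × Int) =>
        d.foldl (fun count kv => if kv.1 ≤ year then count + kv.2 else count) 0) pubs []
    simp only [List.nil_append] at h1
    rw [h1, hL]
    apply List.map_congr_left
    intro d _
    simpa using inner_total_eq year d 0
  rw [htotals]
  set s := PySem.List.sorted L (fun x => x) true with hs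
  have hpw : s.Pairwise (fun a b => b ≤ a) := PySem.List.sorted_pairwise_rev L (fun x => x)
  have hperm : s.Perm L := PySem.List.sorted_perm L (fun x => x) true
  have hlen : s.length = L.length := hperm.length_eq
  have hA : aLoop s 0 0
      = (Nat.findGreatest (fun h => h ≤ L.countP (fun c => decide ((h : Int) ≤ c))) L.length : Int) := by
    rw [aLoop_eq_gk, gk_eq_findGreatest s hpw, hlen]
    have hc : ∀ h : Nat, s.countP (fun c => decide ((h : Int) ≤ c))
        = L.countP (fun c => decide ((h : Int) ≤ c)) := fun h => hperm.countP_eq _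
    simp only [hc]
    ring
  have hB := bGo_eq L L.length le_rfl
  rw [Mcnt_top] at hB
  simp only [Nat.cast_zero] at hB
  rw [hA]
  exact hB.symm
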